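-- pv_equiv track=rewrite | github.com/cashinflash/Cif-website | decision_engine.py | _categorize_from_memo
-- ===== SOURCE A (Python) =====
-- def _categorize_from_memo(memo):
--     """Determine expense category from Zelle memo text."""
--     if not memo: return None
--     m = memo.lower()
--     if any(k in m for k in ['rent', 'lease', 'apartment', 'housing']): return 'rent'
--     if any(k in m for k in ['loan', 'owe', 'payback', 'pay back', 'borrow']): return 'loan_payment'
--     if any(k in m for k in ['bill', 'utilities', 'electric', 'water', 'gas bill', 'power']): return 'utilities'
--     if any(k in m for k in ['kaiser', 'medical', 'doctor', 'hospital', 'pharmacy']): return 'medical'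
--     if any(k in m for k in ['food', 'dinner', 'lunch', 'groceries']): return 'restaurants'
--     if any(k in m for k in ['insurance', 'premium']): return 'insurance'
--     if any(k in m for k in ['childcare', 'daycare', 'babysit']): return 'childcare'
--     return None
-- ===== SOURCE B (Python) =====
-- # Flat keyword->category index; collect ALL matching categories into a set,
-- # then pick the highest-priority one by rank (priorities mirror A's branch order).
-- KEYWORD_CATEGORY = {
--     'rent': 'rent', 'lease': 'rent', 'apartment': 'rent', 'housing': 'rent',
--     'loan': 'loan_payment', 'owe': 'loan_payment', 'payback': 'loan_payment',
--     'pay back': 'loan_payment', 'borrow': 'loan_payment',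
--     'bill': 'utilities', 'utilities': 'utilities', 'electric': 'utilities',
--     'water': 'utilities', 'gas bill': 'utilities', 'power': 'utilities',
--     'kaiser': 'medical', 'medical': 'medical', 'doctor': 'medical',
--     'hospital': 'medical', 'pharmacy': 'medical',
--     'food': 'restaurants', 'dinner': 'restaurants', 'lunch': 'restaurants',
--     'groceries': 'restaurants',
--     'insurance': 'insurance', 'premium': 'insurance',
--     'childcare': 'childcare', 'daycare': 'childcare', 'babysit': 'childcare',
-- }
--
-- PRIORITY = {'rent': 0, 'loan_payment': 1, 'utilities': 2, 'medical': 3,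
--             'restaurants': 4, 'insurance': 5, 'childcare': 6}
--
-- def _categorize_from_memo(memo):
--     """Determine expense category from Zelle memo text."""
--     if not memo:
--         return None
--     m = memo.lower()
--     hits = {c for k, c in KEYWORD_CATEGORY.items() if k in m}
--     return min(hits, key=PRIORITY.get) if hits else None
-- ===== Notes on version B (the rewrite author's own statement) =====
-- stated objective: alternative
-- what changed: Instead of A's ordered early-return if-chain over keyword groups, B builds a flat keyword-to-category index, collects the set of ALL categories whose keywords occur in the memo in one exhaustive pass, and returns the minimum of that set under a priority ranking mirroring A's branch order.
import Mathlib
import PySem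

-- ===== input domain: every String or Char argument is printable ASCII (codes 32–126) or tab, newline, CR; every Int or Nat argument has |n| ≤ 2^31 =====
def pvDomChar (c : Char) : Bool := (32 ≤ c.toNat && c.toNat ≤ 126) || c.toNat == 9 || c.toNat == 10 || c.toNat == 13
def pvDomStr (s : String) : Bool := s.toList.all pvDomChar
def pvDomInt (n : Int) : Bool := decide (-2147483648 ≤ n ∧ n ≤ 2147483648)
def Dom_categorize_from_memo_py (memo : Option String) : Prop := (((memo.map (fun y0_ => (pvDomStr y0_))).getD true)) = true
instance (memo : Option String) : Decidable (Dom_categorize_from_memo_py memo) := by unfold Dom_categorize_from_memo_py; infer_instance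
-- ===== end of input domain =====

-- B replaces A's ordered early-return if-chain by a flat keyword→category index:
-- it collects ALL matching categories into a set in one pass and picks the
-- highest-priority one by rank (alternative decomposition; same cost).

-- ===== PORT A =====
def categorize_from_memo_py (memo : Option String) : Option String :=
  match memo with
  | none => none
  | some memo =>
    if memo = "" then none
    else
      let m := PySem.Str.lower memo
      if (["rent", "lease", "apartment", "housing"].any (fun k => PySem.Str.isIn k m)) then some "rent"
      else if (["loan", "owe", "payback", "pay back", "borrow"].any (fun k => PySem.Str.isIn k m)) then some "loan_payment"
      else if (["bill", "utilities", "electric", "water", "gas bill", "power"].any (fun k => PySem.Str.isIn k m)) then some "utilities"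
      else if (["kaiser", "medical", "doctor", "hospital", "pharmacy"].any (fun k => PySem.Str.isIn k m)) then some "medical"
      else if (["food", "dinner", "lunch", "groceries"].any (fun k => PySem.Str.isIn k m)) then some "restaurants"
      else if (["insurance", "premium"].any (fun k => PySem.Str.isIn k m)) then some "insurance"
      else if (["childcare", "daycare", "babysit"].any (fun k => PySem.Str.isIn k m)) then some "childcare"
      else none

-- ===== PORT B =====
-- KEYWORD_CATEGORY dict of Source B (association list in insertion order)
def pvKeywordCategory : List (String × String) :=
  [ ("rent", "rent"), ("lease", "rent"), ("apartment", "rent"), ("housing", "rent"),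
    ("loan", "loan_payment"), ("owe", "loan_payment"), ("payback", "loan_payment"),
    ("pay back", "loan_payment"), ("borrow", "loan_payment"),
    ("bill", "utilities"), ("utilities", "utilities"), ("electric", "utilities"),
    ("water", "utilities"), ("gas bill", "utilities"), ("power", "utilities"),
    ("kaiser", "medical"), ("medical", "medical"), ("doctor", "medical"),
    ("hospital", "medical"), ("pharmacy", "medical"),
    ("food", "restaurants"), ("dinner", "restaurants"), ("lunch", "restaurants"),
    ("groceries", "restaurants"),
    ("insurance", "insurance"), ("premium", "insurance"),
    ("childcare", "childcare"), ("daycare", "childcare"), ("babysit", "childcare") ]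

-- PRIORITY dict of Source B
def pvPriority : PySem.Dict String Int := PySem.Dict.ofList
  [ ("rent", (0:Int)), ("loan_payment", 1), ("utilities", 2), ("medical", 3),
    ("restaurants", 4), ("insurance", 5), ("childcare", 6) ]

def categorize_from_memo_py_alt (memo : Option String) : Option String :=
  match memo with
  | none => none
  | some s =>
    if s = "" then none
    else
      let m := PySem.Str.lower s
      -- hits = {c for k, c in KEYWORD_CATEGORY.items() if k in m}
      let hits : PySem.Set String :=
        PySem.Set.ofList ((pvKeywordCategory.filter (fun kv => PySem.Str.isIn kv.1 m)).map (fun kv => kv.2))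
      -- min(hits, key=PRIORITY.get) if hits else None (every hit is a PRIORITY key)
      if hits = [] then none
      else PySem.List.min? hits (fun c => PySem.Dict.getD pvPriority c 0)

-- ===== PRECONDITION & SPEC =====
def Spec_categorize_from_memo_py (memo : Option String) (out : Option String) : Prop := out = categorize_from_memo_py_alt memo
instance (memo : Option String) (out : Option String) : Decidable (Spec_categorize_from_memo_py memo out) := by unfold Spec_categorize_from_memo_py; infer_instance

-- ===== CLAIM (what is proved, stated in full; the proofs are below) =====
def Claim_equal_categorize_from_memo_py : Prop := ∀ (memo : Option String), Dom_categorize_from_memo_py memo → Spec_categorize_from_memo_py memo (categorize_from_memo_py memo)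

-- ===== LEMMAS AND PROOFS =====

-- filtering a constant-category segment, then projecting, = constant list over the filtered keywords
theorem pv_seg_contrib (ks : List String) (c : String) (p : String → Bool) :
    (((ks.map (fun k => (k, c))).filter (fun kv => p kv.1)).map (fun kv => kv.2))
      = (ks.filter p).map (fun _ => c) := by
  induction ks with
  | nil => rfl
  | cons k t ih =>
    by_cases h : p k <;> simp [h, ih]

-- updating with a constant list adds the constant iff the list is nonempty
theorem pv_update_const (l : List String) (c : String) (s : PySem.Set String) :
    PySem.Set.update s (l.map (fun _ => c))
      = if l.isEmpty then s else PySem.Set.add s c := by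
  induction l generalizing s with
  | nil => rfl
  | cons x t ih =>
    simp only [List.map_cons, List.isEmpty_cons, PySem.Set.update, List.foldl_cons]
    rw [show (List.map (fun _ => c) t).foldl PySem.Set.add (PySem.Set.add s c)
          = PySem.Set.update (PySem.Set.add s c) (t.map (fun _ => c)) from rfl, ih]
    cases t <;> simp

-- one group's contribution to the hit set
theorem pv_contrib (ks : List String) (c : String) (p : String → Bool) (s : PySem.Set String) :
    PySem.Set.update s (((ks.map (fun k => (k, c))).filter (fun kv => p kv.1)).map (fun kv => kv.2))
      = if ks.any p then PySem.Set.add s c else s := by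
  rw [pv_seg_contrib, pv_update_const]
  rcases h : ks.any p with _ | _
  · have hnil : ks.filter p = [] := by
      rw [List.filter_eq_nil_iff]
      intro x hx hpx
      exact absurd hpx (by simpa using List.any_eq_false.mp h x hx)
    simp [hnil]
  · obtain ⟨x, hx, hpx⟩ := List.any_eq_true.mp h
    have : ks.filter p ≠ [] := by
      simp [List.filter_eq_nil_iff]; exact ⟨x, hx, hpx⟩
    simp [List.isEmpty_iff, this]

-- ===== VERDICT (by name: the statement is the Claim_ definition above) =====
set_option maxHeartbeats 2000000 in
theorem categorize_from_memo_py_spec : Claim_equal_categorize_from_memo_py := by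
  intro memo _
  unfold Spec_categorize_from_memo_py
  cases memo with
  | none => rfl
  | some s =>
    unfold categorize_from_memo_py categorize_from_memo_py_alt
    by_cases hs : s = ""
    · simp [hs]
    · simp only [hs, if_false]
      set m := PySem.Str.lower s with hm
      have hflat : pvKeywordCategory
          = (["rent", "lease", "apartment", "housing"].map (fun k => (k, "rent")))
            ++ (["loan", "owe", "payback", "pay back", "borrow"].map (fun k => (k, "loan_payment")))
            ++ (["bill", "utilities", "electric", "water", "gas bill", "power"].map (fun k => (k, "utilities")))
            ++ (["kaiser", "medical", "doctor", "hospital", "pharmacy"].map (fun k => (k, "medical")))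
            ++ (["food", "dinner", "lunch", "groceries"].map (fun k => (k, "restaurants")))
            ++ (["insurance", "premium"].map (fun k => (k, "insurance")))
            ++ (["childcare", "daycare", "babysit"].map (fun k => (k, "childcare"))) := by rfl
      have hofl : ∀ l : List String, PySem.Set.ofList l = PySem.Set.update ([] : PySem.Set String) l := fun _ => rfl
      have hupd : ∀ (a b : List String) (t : PySem.Set String),
          PySem.Set.update t (a ++ b) = PySem.Set.update (PySem.Set.update t a) b :=
        fun a b t => List.foldl_append ..
      rw [hflat]
      simp only [List.filter_append, List.map_append, hofl, hupd,
        pv_contrib _ _ (fun k => PySem.Str.isIn k m)]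
      rcases h1 : (["rent", "lease", "apartment", "housing"].any (fun k => PySem.Str.isIn k m)) with _ | _ <;>
      rcases h2 : (["loan", "owe", "payback", "pay back", "borrow"].any (fun k => PySem.Str.isIn k m)) with _ | _ <;>
      rcases h3 : (["bill", "utilities", "electric", "water", "gas bill", "power"].any (fun k => PySem.Str.isIn k m)) with _ | _ <;>
      rcases h4 : (["kaiser", "medical", "doctor", "hospital", "pharmacy"].any (fun k => PySem.Str.isIn k m)) with _ | _ <;>
      rcases h5 : (["food", "dinner", "lunch", "groceries"].any (fun k => PySem.Str.isIn k m)) with _ | _ <;>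
      rcases h6 : (["insurance", "premium"].any (fun k => PySem.Str.isIn k m)) with _ | _ <;>
      rcases h7 : (["childcare", "daycare", "babysit"].any (fun k => PySem.Str.isIn k m)) with _ | _ <;>
        (try simp only [h1, h2, h3, h4, h5, h6, h7]) <;>
        decide
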